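-- pv_equiv track=rewrite | github.com/de-algorithm/coding-test-study | kangdaia/_13주차/cs_team_members.py | waiting_time
-- ===== SOURCE A (Python) =====
-- from heapq import heappop, heappush
--
-- def waiting_time(mentor_dist, reqs):
--     slots = []
--     total_waiting = 0
--     for n in mentor_dist:
--         slots.append([0 for _ in range(n)])
--     for req in reqs:
--         start_t, req_t, req_type = req
--         prev_end_t = heappop(slots[req_type-1])
--         total_waiting += max(0, prev_end_t-start_t)
--         heappush(slots[req_type-1], max(start_t, prev_end_t)+req_t)
--     return total_waiting
-- ===== SOURCE B (Python) =====
-- def waiting_time(mentor_dist, reqs):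
--     slots = [[0] * n for n in mentor_dist]
--     total_waiting = 0
--     for start_t, req_t, req_type in reqs:
--         group = slots[req_type - 1]
--         prev_end_t = min(group)
--         total_waiting += max(0, prev_end_t - start_t)
--         group[group.index(prev_end_t)] = max(start_t, prev_end_t) + req_t
--     return total_waiting
-- ===== Notes on version B (the rewrite author's own statement) =====
-- stated objective: simpler
-- what changed: Replaces the per-type heapq min-heaps by plain lists of mentor availability times: each request takes min(group) and overwrites one slot holding that minimum in place, with no heap machinery.
import Mathlib
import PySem

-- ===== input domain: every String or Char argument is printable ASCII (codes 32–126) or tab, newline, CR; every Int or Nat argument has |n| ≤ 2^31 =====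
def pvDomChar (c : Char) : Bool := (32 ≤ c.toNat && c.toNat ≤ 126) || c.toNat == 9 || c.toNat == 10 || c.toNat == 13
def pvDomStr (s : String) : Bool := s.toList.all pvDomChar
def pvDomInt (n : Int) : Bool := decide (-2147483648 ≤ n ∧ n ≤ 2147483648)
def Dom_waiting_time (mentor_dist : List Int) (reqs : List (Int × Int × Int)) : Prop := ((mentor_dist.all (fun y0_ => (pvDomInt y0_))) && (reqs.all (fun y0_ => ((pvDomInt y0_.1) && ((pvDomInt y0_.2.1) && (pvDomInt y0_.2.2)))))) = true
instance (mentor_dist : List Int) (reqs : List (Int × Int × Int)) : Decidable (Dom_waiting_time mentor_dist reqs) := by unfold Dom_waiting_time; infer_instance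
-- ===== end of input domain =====

-- B replaces A's per-type heapq min-heaps by plain lists of availability times
-- (min + in-place overwrite of one minimal slot): simpler, no heap machinery; same results.


-- ===== PORT A =====
-- heapq.heappop / heappush are ported by hand at the level A observes them: the heap is
-- the list of pending end-times; heappop returns its minimum (none = IndexError on an
-- empty heap) and removes one occurrence of it, heappush adds the element.  This is exact
-- for A's result, which depends only on the sequence of popped minima (the multiset of
-- pending times), not on heapq's internal array layout.
def pyHeappop (heap : List Int) : Option (Int × List Int) :=
  match PySem.List.min? heap (fun x => x) with
  | none => none
  | some m =>
    match PySem.List.remove? heap m with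
    | none => none
    | some rest => some (m, rest)

def pyHeappush (heap : List Int) (item : Int) : List Int := heap ++ [item]

-- one iteration of A's 'for req in reqs' loop (state = (slots, total_waiting); none = raised);
-- the in-place mutation of slots[req_type-1] by heappop/heappush is modelled by writing the
-- new heap back at the same (Python-wrapped) index, which never raises once the read succeeded.
def waiting_time_loop (st : Option (List (List Int) × Int)) (req : Int × Int × Int) :
    Option (List (List Int) × Int) :=
  match st with
  | none => none
  | some (slots, total) =>
    match PySem.List.pyGet? slots (req.2.2 - 1) with
    | none => none
    | some heap =>
      match pyHeappop heap with
      | none => none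
      | some (prev_end_t, rest) =>
        some (PySem.List.pySetD slots (req.2.2 - 1)
                (pyHeappush rest (max req.1 prev_end_t + req.2.1)),
              total + max 0 (prev_end_t - req.1))

def waiting_time (mentor_dist : List Int) (reqs : List (Int × Int × Int)) : Int :=
  match reqs.foldl waiting_time_loop
      (some (mentor_dist.map (fun n => (PySem.List.pyRange 0 n 1).map (fun _ => (0 : Int))), 0)) with
  | some (_, total) => total
  | none => 0   -- unreachable under Pre_waiting_time (the Python raises there)

-- ===== PORT B =====
-- one iteration of B's loop: take min(group), add the wait, overwrite the slot
-- group.index(min) in place (group[i] = v with 0 ≤ i < len never raises).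
def waiting_time_alt_loop (st : Option (List (List Int) × Int)) (req : Int × Int × Int) :
    Option (List (List Int) × Int) :=
  st.bind fun s =>
  (PySem.List.pyGet? s.1 (req.2.2 - 1)).bind fun group =>
  (PySem.List.min? group (fun x => x)).bind fun prev_end_t =>
  (PySem.List.index? group prev_end_t).map fun i =>
  (PySem.List.pySetD s.1 (req.2.2 - 1) (group.set i (max req.1 prev_end_t + req.2.1)),
   s.2 + max 0 (prev_end_t - req.1))

def waiting_time_alt (mentor_dist : List Int) (reqs : List (Int × Int × Int)) : Int :=
  match reqs.foldl waiting_time_alt_loop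
      (some (mentor_dist.map (fun n => PySem.List.pyRepeat [(0 : Int)] n), 0)) with
  | some (_, total) => total
  | none => 0   -- unreachable under Pre_waiting_time (the Python raises there)

-- ===== PRECONDITION & SPEC =====
-- Pre_ is exactly the inputs on which the Python A returns: every request's (possibly
-- negative, Python-wrapped) index req_type-1 hits mentor_dist and that mentor group is
-- nonempty (its size ≥ 1); otherwise slots[req_type-1] raises IndexError or heappop
-- raises IndexError on the empty group (group sizes never change during the loop).
def Pre_waiting_time (mentor_dist : List Int) (reqs : List (Int × Int × Int)) : Prop :=
  (reqs.all (fun r => decide (1 ≤ (PySem.List.pyGet? mentor_dist (r.2.2 - 1)).getD 0))) = true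
instance (mentor_dist : List Int) (reqs : List (Int × Int × Int)) : Decidable (Pre_waiting_time mentor_dist reqs) := by unfold Pre_waiting_time; infer_instance

def pvWitness_waiting_time : List Int × (List (Int × Int × Int)) :=
  ([1, 2], [(0, 5, 1), (2, 3, 2), (1, 4, 2)])

def Spec_waiting_time (mentor_dist : List Int) (reqs : List (Int × Int × Int)) (out : Int) : Prop := out = waiting_time_alt mentor_dist reqs
instance (mentor_dist : List Int) (reqs : List (Int × Int × Int)) (out : Int) : Decidable (Spec_waiting_time mentor_dist reqs out) := by unfold Spec_waiting_time; infer_instance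

-- ===== CLAIM (what is proved, stated in full; the proofs are below) =====
def Claim_equal_waiting_time : Prop := ∀ (mentor_dist : List Int) (reqs : List (Int × Int × Int)), Dom_waiting_time mentor_dist reqs → Pre_waiting_time mentor_dist reqs → Spec_waiting_time mentor_dist reqs (waiting_time mentor_dist reqs)

-- ===== LEMMAS AND PROOFS =====

-- relation between the two loop states: same raised-ness, same running total, and the
-- corresponding groups are permutations of one another (A reorders its heap, B updates in place)
def pvRel (sa sb : Option (List (List Int) × Int)) : Prop :=
  match sa, sb with
  | none, none => True
  | some (la, ta), some (lb, tb) =>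
      ta = tb ∧ la.length = lb.length ∧
      ∀ (j : Nat) (hja : j < la.length) (hjb : j < lb.length), la[j].Perm lb[j]
  | _, _ => False

lemma pyIdx?_lt {n : Nat} {i : Int} {j : Nat} (h : PySem.List.pyIdx? n i = some j) : j < n := by
  unfold PySem.List.pyIdx? at h
  split_ifs at h <;> simp_all <;> omega

lemma min?_id_perm {la lb : List Int} (h : la.Perm lb) :
    PySem.List.min? la (fun x => x) = PySem.List.min? lb (fun x => x) := by
  cases hla : PySem.List.min? la (fun x => x) with
  | none =>
    rw [PySem.List.min?_eq_none_iff] at hla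
    subst hla
    have hb : lb = [] := h.symm.eq_nil
    subst hb
    exact ((PySem.List.min?_eq_none_iff [] _).2 rfl).symm
  | some m =>
    cases hlb : PySem.List.min? lb (fun x => x) with
    | none =>
      rw [PySem.List.min?_eq_none_iff] at hlb
      subst hlb
      rw [h.eq_nil, (PySem.List.min?_eq_none_iff [] _).2 rfl] at hla
      cases hla
    | some m' =>
      have h1 : m ≤ m' := PySem.List.min?_isMin hla m' (h.mem_iff.2 (PySem.List.min?_mem hlb))
      have h2 : m' ≤ m := PySem.List.min?_isMin hlb m (h.mem_iff.1 (PySem.List.min?_mem hla))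
      exact congrArg some (le_antisymm h1 h2)

lemma set_index_perm {g : List Int} {m v : Int} {i : Nat}
    (h : PySem.List.index? g m = some i) :
    (g.set i v).Perm (g.erase m ++ [v]) := by
  obtain ⟨pre, suf, rfl, rfl, hpre⟩ := (PySem.List.index?_eq_some_iff g m i).1 h
  have hset : (pre ++ m :: suf).set pre.length v = pre ++ v :: suf := by
    induction pre with
    | nil => simp
    | cons a t _ => simp
  have herase : (pre ++ m :: suf).erase m = pre ++ suf := by
    rw [List.erase_append_right _ hpre, List.erase_cons_head]
  rw [hset, herase, List.append_assoc]
  exact List.Perm.append_left pre (List.perm_append_singleton v suf).symm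

lemma step_rel (req : Int × Int × Int) {sa sb : Option (List (List Int) × Int)}
    (h : pvRel sa sb) :
    pvRel (waiting_time_loop sa req) (waiting_time_alt_loop sb req) := by
  cases sa with
  | none => cases sb with
    | none => simpa [waiting_time_loop, waiting_time_alt_loop] using h
    | some pb => exact absurd h (by simp [pvRel])
  | some pa =>
    cases sb with
    | none => exact absurd h (by simp [pvRel])
    | some pb =>
      obtain ⟨la, ta⟩ := pa
      obtain ⟨lb, tb⟩ := pb
      obtain ⟨ht, hlen, hperm⟩ := h
      subst ht
      simp only [waiting_time_loop, waiting_time_alt_loop, PySem.List.pyGet?, Option.bind_some]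
      rw [hlen]
      cases hidx : PySem.List.pyIdx? lb.length (req.2.2 - 1) with
      | none => simp [pvRel]
      | some j =>
        have hjb : j < lb.length := pyIdx?_lt hidx
        have hja : j < la.length := by omega
        have hgp : la[j].Perm lb[j] := hperm j hja hjb
        simp only [Option.bind_some, List.getElem?_eq_getElem hja, List.getElem?_eq_getElem hjb]
        cases hmin : PySem.List.min? lb[j] (fun x => x) with
        | none =>
          have hmin' : PySem.List.min? la[j] (fun x => x) = none := by
            rw [min?_id_perm hgp, hmin]
          simp [pvRel, pyHeappop, hmin']
        | some m =>
          have hma : m ∈ la[j] := hgp.mem_iff.2 (PySem.List.min?_mem hmin)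
          have hmb : m ∈ lb[j] := PySem.List.min?_mem hmin
          have hpop : pyHeappop la[j] = some (m, la[j].erase m) := by
            unfold pyHeappop
            rw [min?_id_perm hgp, hmin]
            simp [PySem.List.remove?_eq_some_erase _ m hma]
          cases hi : PySem.List.index? lb[j] m with
          | none => exact absurd ((PySem.List.index?_eq_none_iff _ _).1 hi) (by simpa using hmb)
          | some i =>
            rw [hpop]
            simp only [Option.bind_some, hi, Option.map_some]
            refine ⟨rfl, ?_, ?_⟩
            · simp [PySem.List.pySetD, PySem.List.pySet?, hlen, hidx]
            · intro j' hja' hjb'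
              have hla' : j' < la.length := by
                simpa [PySem.List.pySetD, PySem.List.pySet?, hlen, hidx] using hja'
              have hlb' : j' < lb.length := by
                simpa [PySem.List.pySetD, PySem.List.pySet?, hidx] using hjb'
              simp only [PySem.List.pySetD, PySem.List.pySet?, hlen, hidx, Option.map_some,
                Option.getD_some, List.getElem_set]
              split_ifs with hjj
              · subst hjj
                exact ((hgp.erase m).append_right [max req.1 m + req.2.1]).trans
                  (set_index_perm hi).symm
              · exact hperm j' hla' hlb'

lemma fold_rel (reqs : List (Int × Int × Int)) {sa sb : Option (List (List Int) × Int)}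
    (h : pvRel sa sb) :
    pvRel (reqs.foldl waiting_time_loop sa) (reqs.foldl waiting_time_alt_loop sb) := by
  induction reqs generalizing sa sb with
  | nil => simpa using h
  | cons r t ih => exact ih (step_rel r h)

lemma init_rel (mentor_dist : List Int) :
    pvRel (some (mentor_dist.map (fun n => (PySem.List.pyRange 0 n 1).map (fun _ => (0 : Int))), 0))
          (some (mentor_dist.map (fun n => PySem.List.pyRepeat [(0 : Int)] n), 0)) := by
  refine ⟨rfl, by simp, ?_⟩
  intro j hja hjb
  simp only [List.getElem_map]
  have : ((PySem.List.pyRange 0 (mentor_dist[j]'(by simpa using hja)) 1).map (fun _ => (0 : Int)))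
      = PySem.List.pyRepeat [(0 : Int)] (mentor_dist[j]'(by simpa using hja)) := by
    rw [PySem.List.pyRepeat_singleton, List.eq_replicate_iff]
    refine ⟨?_, by simp⟩
    simp [PySem.List.length_pyRange_one]
  rw [this]

theorem waiting_time_eq_alt (mentor_dist : List Int) (reqs : List (Int × Int × Int)) :
    waiting_time mentor_dist reqs = waiting_time_alt mentor_dist reqs := by
  unfold waiting_time waiting_time_alt
  have h := fold_rel reqs (init_rel mentor_dist)
  cases ha : reqs.foldl waiting_time_loop
      (some (mentor_dist.map (fun n => (PySem.List.pyRange 0 n 1).map (fun _ => (0 : Int))), 0)) with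
  | none =>
    cases hb : reqs.foldl waiting_time_alt_loop
        (some (mentor_dist.map (fun n => PySem.List.pyRepeat [(0 : Int)] n), 0)) with
    | none => rfl
    | some pb => rw [ha, hb] at h; exact absurd h (by simp [pvRel])
  | some pa =>
    cases hb : reqs.foldl waiting_time_alt_loop
        (some (mentor_dist.map (fun n => PySem.List.pyRepeat [(0 : Int)] n), 0)) with
    | none => rw [ha, hb] at h; exact absurd h (by simp [pvRel])
    | some pb =>
      rw [ha, hb] at h
      obtain ⟨lb, tb⟩ := pb
      obtain ⟨la, ta⟩ := pa
      exact h.1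

-- ===== VERDICT (by name: the statement is the Claim_ definition above) =====
theorem waiting_time_spec : Claim_equal_waiting_time := by
  intro mentor_dist reqs _ _
  unfold Spec_waiting_time
  exact waiting_time_eq_alt mentor_dist reqs
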